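-- pv_equiv track=rewrite | github.com/zommuter/markeast | markeast.py | get_html_text
-- ===== SOURCE A (Python) =====
-- def get_html_text(text):
--     tmp = text.split("<")
--     output = ""
--     for t in tmp:
--         x = t.split(">")
--         if len(x) == 2:
--             output += x[1]
--     return output
-- ===== SOURCE B (Python) =====
-- def get_html_text(text):
--     # One left-to-right pass over the characters with a small state machine,
--     # instead of split("<") plus an inner split(">") per segment.
--     out = []
--     buf = []
--     gts = 0  # number of '>' seen in the current '<'-delimited segment
--     for c in text:
--         if c == '<':
--             if gts == 1:
--                 out += buf
--             buf = []
--             gts = 0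
--         elif c == '>':
--             gts += 1
--             buf = []
--         else:
--             if gts == 1:
--                 buf.append(c)
--     if gts == 1:
--         out += buf
--     return ''.join(out)
-- ===== Notes on version B (the rewrite author's own statement) =====
-- stated objective: alternative
-- what changed: Replaces split('<') plus an inner split('>') per segment with a single left-to-right character scan driven by a small state machine (count of '>' in the current segment, a buffer of trailing text).
import Mathlib
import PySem

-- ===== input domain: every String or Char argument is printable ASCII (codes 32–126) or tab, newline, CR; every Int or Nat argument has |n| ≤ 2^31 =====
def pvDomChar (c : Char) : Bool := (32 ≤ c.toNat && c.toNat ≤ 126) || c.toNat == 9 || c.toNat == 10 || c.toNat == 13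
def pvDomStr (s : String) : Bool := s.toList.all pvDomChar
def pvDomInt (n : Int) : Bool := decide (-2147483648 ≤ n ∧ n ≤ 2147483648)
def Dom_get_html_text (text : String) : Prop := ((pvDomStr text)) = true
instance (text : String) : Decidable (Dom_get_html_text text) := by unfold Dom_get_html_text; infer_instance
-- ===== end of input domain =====

-- B replaces the split/split loop of A with one character-level state machine pass ('alternative', same cost).

-- ===== PORT A =====
def get_html_text (text : String) : String :=
  String.mk ((PySem.Chars.splitOn text.toList ['<']).foldl
    (fun output t =>
      let x := PySem.Chars.splitOn t ['>']
      if x.length = 2 then output ++ PySem.List.pyGetD x 1 [] else output) [])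

-- ===== PORT B =====
def pvStep (st : Nat × List Char × List Char) (c : Char) : Nat × List Char × List Char :=
  if c = '<' then (0, [], if st.1 = 1 then st.2.2 ++ st.2.1 else st.2.2)
  else if c = '>' then (st.1 + 1, [], st.2.2)
  else if st.1 = 1 then (st.1, st.2.1 ++ [c], st.2.2)
  else st

def get_html_text_alt (text : String) : String :=
  let st := text.toList.foldl pvStep (0, [], [])
  String.mk (if st.1 = 1 then st.2.2 ++ st.2.1 else st.2.2)

-- ===== PRECONDITION & SPEC =====
def Spec_get_html_text (text : String) (out : String) : Prop := out = get_html_text_alt text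
instance (text : String) (out : String) : Decidable (Spec_get_html_text text out) := by unfold Spec_get_html_text; infer_instance

-- ===== CLAIM (what is proved, stated in full; the proofs are below) =====
def Claim_equal_get_html_text : Prop := ∀ (text : String), Dom_get_html_text text → Spec_get_html_text text (get_html_text text)

-- ===== LEMMAS AND PROOFS =====

/-- Structural split on a single separator character: first segment, remaining segments. -/
def pvSplitc (sep : Char) : List Char → List Char × List (List Char)
  | [] => ([], [])
  | c :: r =>
    let p := pvSplitc sep r
    if c = sep then ([], p.1 :: p.2) else (c :: p.1, p.2)

theorem pvSplitOn_go_char (sep : Char) (cs : List Char) : ∀ (fuel : Nat) (cur : List Char)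
    (acc : List (List Char)), cs.length < fuel →
    PySem.Chars.splitOn.go [sep] fuel cs cur acc =
      acc.reverse ++ (cur.reverse ++ (pvSplitc sep cs).1) :: (pvSplitc sep cs).2 := by
  induction cs with
  | nil =>
    intro fuel cur acc h
    cases fuel with
    | zero => omega
    | succ fuel => simp [PySem.Chars.splitOn.go, pvSplitc]
  | cons c r ih =>
    intro fuel cur acc h
    cases fuel with
    | zero => omega
    | succ fuel =>
      by_cases hc : c = sep
      · subst hc
        rw [show PySem.Chars.splitOn.go [c] (fuel + 1) (c :: r) cur acc =
              PySem.Chars.splitOn.go [c] fuel (List.drop 1 (c :: r)) [] (cur.reverse :: acc) by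
            simp [PySem.Chars.splitOn.go, List.isPrefixOf]]
        rw [show List.drop 1 (c :: r) = r from rfl]
        rw [ih fuel [] (cur.reverse :: acc) (by simp at h; omega)]
        simp [pvSplitc]
      · rw [show PySem.Chars.splitOn.go [sep] (fuel + 1) (c :: r) cur acc =
              PySem.Chars.splitOn.go [sep] fuel r (c :: cur) acc by
            simp [PySem.Chars.splitOn.go, List.isPrefixOf, (Ne.symm hc)]]
        rw [ih fuel (c :: cur) acc (by simp at h; omega)]
        simp [pvSplitc, hc]

theorem pvSplitOn_char (sep : Char) (cs : List Char) :
    PySem.Chars.splitOn cs [sep] = (pvSplitc sep cs).1 :: (pvSplitc sep cs).2 := by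
  unfold PySem.Chars.splitOn
  rw [pvSplitOn_go_char sep cs (cs.length + 1) [] [] (by omega)]
  simp

/-- The value A contributes for one '<'-segment, as a function of the '>'-split of the
segment and of the incoming machine state (g, b). -/
def pvSegVal (g : Nat) (b t : List Char) : List Char :=
  match g, (pvSplitc '>' t).2 with
  | 0, [v] => v
  | 1, [] => b ++ (pvSplitc '>' t).1
  | _, _ => []

/-- The (gts, buf) part of B's step, for characters other than '<'. -/
def pvStep2 (p : Nat × List Char) (c : Char) : Nat × List Char :=
  if c = '>' then (p.1 + 1, []) else if p.1 = 1 then (p.1, p.2 ++ [c]) else p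

theorem pvStep_ne_lt (g : Nat) (b o : List Char) (c : Char) (hc : c ≠ '<') :
    pvStep (g, b, o) c = ((pvStep2 (g, b) c).1, (pvStep2 (g, b) c).2, o) := by
  simp only [pvStep, pvStep2, hc, if_false]
  split_ifs <;> rfl

/-- Running B's in-segment machine over a segment t from state (g, b) and
emitting (if the final count is 1) gives exactly pvSegVal. -/
theorem pvRun_seg (t : List Char) : ∀ (g : Nat) (b : List Char),
    (if (t.foldl pvStep2 (g, b)).1 = 1 then (t.foldl pvStep2 (g, b)).2 else []) =
      pvSegVal g b t := by
  induction t with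
  | nil =>
    intro g b
    match g with
    | 0 => simp [pvSegVal, pvSplitc]
    | 1 => simp [pvSegVal, pvSplitc]
    | g + 2 => simp [pvSegVal, pvSplitc]
  | cons c r ih =>
    intro g b
    by_cases hc : c = '>'
    · subst hc
      rw [List.foldl_cons, show pvStep2 (g, b) '>' = (g + 1, []) from rfl, ih]
      rcases hg : g with _ | g'
      · rcases h2 : (pvSplitc '>' r).2 with _ | ⟨v, ts⟩
        · simp [pvSegVal, pvSplitc, h2]
        · simp [pvSegVal, pvSplitc, h2]
      · simp [pvSegVal, pvSplitc]
    · rw [List.foldl_cons, show pvStep2 (g, b) c = if g = 1 then (g, b ++ [c]) else (g, b) by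
        simp [pvStep2, hc]]
      by_cases hg : g = 1
      · subst hg
        rw [if_pos rfl, ih]
        simp [pvSegVal, pvSplitc, hc]
      · rw [if_neg hg, ih]
        match g, hg with
        | 0, _ =>
          rcases h2 : (pvSplitc '>' r).2 with _ | ⟨v, ts⟩
          · simp [pvSegVal, pvSplitc, hc, h2]
          · rcases ts with _ | ⟨w, ts'⟩ <;> simp [pvSegVal, pvSplitc, hc, h2]
        | g' + 2, _ => simp [pvSegVal, pvSplitc, hc]

/-- A's loop body. -/
def pvABody (output t : List Char) : List Char :=
  let x := PySem.Chars.splitOn t ['>']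
  if x.length = 2 then output ++ PySem.List.pyGetD x 1 [] else output

/-- A's per-segment contribution equals pvSegVal at the fresh state (0, []). -/
theorem pvABody_nil (t : List Char) : pvABody [] t = pvSegVal 0 [] t := by
  simp only [pvABody, pvSplitOn_char '>' t]
  rcases h2 : (pvSplitc '>' t).2 with _ | ⟨v, ts⟩
  · simp [pvSegVal, h2]
  · rcases ts with _ | ⟨w, ts'⟩
    · simp [pvSegVal, h2, PySem.List.pyGetD]
    · simp [pvSegVal, h2]

theorem pvABody_out (ts : List (List Char)) : ∀ (o : List Char),
    ts.foldl pvABody o = o ++ ts.foldl pvABody [] := by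
  induction ts with
  | nil => simp
  | cons t ts ih =>
    intro o
    rw [List.foldl_cons, List.foldl_cons, ih (pvABody o t), ih (pvABody [] t)]
    simp only [pvABody]
    split_ifs <;> simp

/-- Main invariant: running B's full machine from (g, b, o) over cs emits o, then the
value of the current segment continued from (g, b), then A's fold over the later segments. -/
theorem pvMain (cs : List Char) : ∀ (g : Nat) (b o : List Char),
    (if (cs.foldl pvStep (g, b, o)).1 = 1
      then (cs.foldl pvStep (g, b, o)).2.2 ++ (cs.foldl pvStep (g, b, o)).2.1
      else (cs.foldl pvStep (g, b, o)).2.2) =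
    o ++ pvSegVal g b (pvSplitc '<' cs).1 ++ ((pvSplitc '<' cs).2).foldl pvABody [] := by
  induction cs with
  | nil =>
    intro g b o
    have h0 := pvRun_seg [] g b
    simp only [List.foldl_nil] at h0 ⊢
    rw [show (pvSplitc '<' []).1 = [] from rfl, show (pvSplitc '<' []).2 = [] from rfl, ← h0]
    split_ifs <;> simp
  | cons c r ih =>
    intro g b o
    have hemit : (if g = 1 then o ++ b else o) = o ++ pvSegVal g b [] := by
      have h0 := pvRun_seg [] g b
      simp only [List.foldl_nil] at h0
      rw [← h0]; split_ifs <;> simp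
    by_cases hc : c = '<'
    · subst hc
      rw [List.foldl_cons, show pvStep (g, b, o) '<' =
            (0, [], if g = 1 then o ++ b else o) from rfl, ih, hemit]
      rcases hs : pvSplitc '<' r with ⟨h, ts⟩
      have hcons : pvSplitc '<' ('<' :: r) = ([], h :: ts) := by simp [pvSplitc, hs]
      rw [hcons, List.foldl_cons, pvABody_out ts (pvABody [] h), pvABody_nil]
      simp [pvSegVal, pvSplitc, List.append_assoc]
    · rw [List.foldl_cons, pvStep_ne_lt g b o c hc, ih]
      rcases hs : pvSplitc '<' r with ⟨h, ts⟩
      have hcons : pvSplitc '<' (c :: r) = (c :: h, ts) := by simp [pvSplitc, hc, hs]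
      rw [hcons]
      have hseg : pvSegVal (pvStep2 (g, b) c).1 (pvStep2 (g, b) c).2 h =
          pvSegVal g b (c :: h) := by
        rw [← pvRun_seg, ← pvRun_seg, List.foldl_cons]
      rw [hseg]

-- ===== VERDICT (by name: the statement is the Claim_ definition above) =====
theorem get_html_text_spec : Claim_equal_get_html_text := by
  intro text _
  unfold Spec_get_html_text
  show get_html_text text = get_html_text_alt text
  have hA : get_html_text text =
      String.mk ((PySem.Chars.splitOn text.toList ['<']).foldl pvABody []) := rfl
  have hB : get_html_text_alt text =
      String.mk (if (text.toList.foldl pvStep (0, [], [])).1 = 1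
        then (text.toList.foldl pvStep (0, [], [])).2.2 ++
          (text.toList.foldl pvStep (0, [], [])).2.1
        else (text.toList.foldl pvStep (0, [], [])).2.2) := rfl
  rw [hA, hB, pvSplitOn_char '<' text.toList, List.foldl_cons,
    pvABody_out _ (pvABody [] (pvSplitc '<' text.toList).1), pvABody_nil]
  have hm := pvMain text.toList 0 [] []
  simp only [List.nil_append] at hm
  exact congrArg String.mk hm.symm
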